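-- pv_equiv track=rewrite | github.com/derekchen14/personal_assistants | _specs/scaffolding/backend/utilities/search.py | find_nearest_valid_option
-- ===== SOURCE A (Python) =====
-- def find_nearest_valid_option(target: str, valid_options: list[str]) -> str:
--   if not target or not valid_options:
--     return target
--
--   # First try exact match
--   if target in valid_options:
--     return target
--
--   # Next try case-insensitive match
--   target_lower = target.lower()
--   for valid_opt in valid_options:
--     if valid_opt.lower() == target_lower:
--       return valid_opt
--
--   # Finally, try matching just letters/numbers, ignoring space and punctuation
--   target_alphanumeric = ''.join(char.lower() for char in target if char.isalnum())
--   for valid_opt in valid_options: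
--     valid_alphanumeric = ''.join(char.lower() for char in valid_opt if char.isalnum())
--     if valid_alphanumeric == target_alphanumeric:
--       return valid_opt
--
--   return target
-- ===== SOURCE B (Python) =====
-- def find_nearest_valid_option(target: str, valid_options: list[str]) -> str:
--   if not target or not valid_options:
--     return target
--
--   target_lower = target.lower()
--   target_alphanumeric = ''.join(char.lower() for char in target if char.isalnum())
--
--   ci_candidate = None
--   an_candidate = None
--   for valid_opt in valid_options:
--     if valid_opt == target:
--       return target
--     if ci_candidate is None and valid_opt.lower() == target_lower:
--       ci_candidate = valid_opt
--     if an_candidate is None and ''.join(char.lower() for char in valid_opt if char.isalnum()) == target_alphanumeric: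
--       an_candidate = valid_opt
--
--   if ci_candidate is not None:
--     return ci_candidate
--   if an_candidate is not None:
--     return an_candidate
--   return target
-- ===== Notes on version B (the rewrite author's own statement) =====
-- stated objective: alternative
-- what changed: Replaces A's three tier-separated scans (exact membership, case-insensitive loop, alphanumeric loop) by a single pass that returns on an exact match and records the first case-insensitive and first alphanumeric candidates, deciding after the pass.
import Mathlib
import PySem

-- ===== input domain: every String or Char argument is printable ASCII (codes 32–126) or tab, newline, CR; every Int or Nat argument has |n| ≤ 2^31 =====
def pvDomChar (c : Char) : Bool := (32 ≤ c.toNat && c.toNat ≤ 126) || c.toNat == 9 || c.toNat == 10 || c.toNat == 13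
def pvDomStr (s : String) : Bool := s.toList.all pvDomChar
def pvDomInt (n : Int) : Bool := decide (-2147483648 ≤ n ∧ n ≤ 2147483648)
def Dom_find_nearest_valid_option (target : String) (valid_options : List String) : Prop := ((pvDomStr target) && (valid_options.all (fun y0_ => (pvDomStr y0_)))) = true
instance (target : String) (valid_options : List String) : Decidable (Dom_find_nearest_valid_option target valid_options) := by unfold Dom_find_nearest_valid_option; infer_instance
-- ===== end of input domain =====

-- B replaces A's three tier-separated scans by a single pass that records first case-insensitive/alphanumeric candidates; same return value, no speed claim.

-- ''.join(char.lower() for char in s if char.isalnum())  (used verbatim by both Pythons)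
def pvAlnumLower (s : String) : String :=
  String.ofList ((s.toList.filter PySem.Chars.isalnum).map PySem.Chars.lowerChar)

-- ===== PORT A =====
def find_nearest_valid_option (target : String) (valid_options : List String) : String :=
  if target = "" ∨ valid_options = [] then target
  else if target ∈ valid_options then target
  else
    let target_lower := PySem.Str.lower target
    match valid_options.find? (fun valid_opt => PySem.Str.lower valid_opt == target_lower) with
    | some valid_opt => valid_opt
    | none =>
      let target_alphanumeric := pvAlnumLower target
      match valid_options.find? (fun valid_opt => pvAlnumLower valid_opt == target_alphanumeric) with
      | some valid_opt => valid_opt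
      | none => target

-- ===== PORT B =====
-- the single pass of Source B: exact match returns target; otherwise keep the first
-- case-insensitive and first alphanumeric candidates and decide after the loop
def fnvoLoop (target target_lower target_alphanumeric : String) :
    List String → Option String → Option String → String
  | [], ci, an =>
    match ci with
    | some c => c
    | none => match an with
      | some a => a
      | none => target
  | valid_opt :: rest, ci, an =>
    if valid_opt = target then target
    else
      fnvoLoop target target_lower target_alphanumeric rest
        (if ci.isNone && (PySem.Str.lower valid_opt == target_lower) then some valid_opt else ci)
        (if an.isNone && (pvAlnumLower valid_opt == target_alphanumeric) then some valid_opt else an)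

def find_nearest_valid_option_alt (target : String) (valid_options : List String) : String :=
  if target = "" ∨ valid_options = [] then target
  else fnvoLoop target (PySem.Str.lower target) (pvAlnumLower target) valid_options none none

-- ===== PRECONDITION & SPEC =====
def Spec_find_nearest_valid_option (target : String) (valid_options : List String) (out : String) : Prop := out = find_nearest_valid_option_alt target valid_options
instance (target : String) (valid_options : List String) (out : String) : Decidable (Spec_find_nearest_valid_option target valid_options out) := by unfold Spec_find_nearest_valid_option; infer_instance

-- ===== CLAIM (what is proved, stated in full; the proofs are below) =====
def Claim_equal_find_nearest_valid_option : Prop := ∀ (target : String) (valid_options : List String), Dom_find_nearest_valid_option target valid_options → Spec_find_nearest_valid_option target valid_options (find_nearest_valid_option target valid_options)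

-- ===== LEMMAS AND PROOFS =====

-- ===== VERDICT (by name: the statement is the Claim_ definition above) =====
-- loop invariant: fnvoLoop with pending candidates ci/an computes exact-tier first,
-- then ci (or the first case-insensitive match), then an (or the first alphanumeric match)
theorem fnvoLoop_characterize (target target_lower target_alphanumeric : String)
    (l : List String) (ci an : Option String) :
    fnvoLoop target target_lower target_alphanumeric l ci an =
      if target ∈ l then target
      else
        match ci.or (l.find? (fun o => PySem.Str.lower o == target_lower)) with
        | some c => c
        | none =>
          match an.or (l.find? (fun o => pvAlnumLower o == target_alphanumeric)) with
          | some a => a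
          | none => target := by
  induction l generalizing ci an with
  | nil => cases ci <;> cases an <;> simp [fnvoLoop]
  | cons o rest ih =>
    by_cases ho : o = target
    · subst ho; simp [fnvoLoop]
    · have hne : target ≠ o := fun h => ho h.symm
      rw [show fnvoLoop target target_lower target_alphanumeric (o :: rest) ci an =
        fnvoLoop target target_lower target_alphanumeric rest
          (if ci.isNone && (PySem.Str.lower o == target_lower) then some o else ci)
          (if an.isNone && (pvAlnumLower o == target_alphanumeric) then some o else an)
        from by simp [fnvoLoop, ho]]
      rw [ih]
      have hb1 : (PySem.Str.lower o == target_lower) = decide (PySem.Str.lower o = target_lower) := by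
        by_cases h : PySem.Str.lower o = target_lower <;> simp [h]
      have hb2 : (pvAlnumLower o == target_alphanumeric) = decide (pvAlnumLower o = target_alphanumeric) := by
        by_cases h : pvAlnumLower o = target_alphanumeric <;> simp [h]
      by_cases h1 : PySem.Str.lower o = target_lower <;>
        by_cases h2 : pvAlnumLower o = target_alphanumeric <;>
        cases ci <;> cases an <;>
        simp [List.find?, List.mem_cons, hne, hb1, hb2, h1, h2]

theorem find_nearest_valid_option_spec : Claim_equal_find_nearest_valid_option := by
  intro target valid_options _
  unfold Spec_find_nearest_valid_option find_nearest_valid_option find_nearest_valid_option_alt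
  by_cases hg : target = "" ∨ valid_options = []
  · simp [hg]
  · rw [if_neg hg, if_neg hg, fnvoLoop_characterize]
    simp
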